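-- pv_equiv track=rewrite | github.com/anananacr/regae-utils | scripts/algorithms/find_center_friedel.py | select_closest_peaks
-- ===== SOURCE A (Python) =====
-- import math
--
-- def remove_repeated_items(pairs_list: list) -> list:
--     x_vector = []
--     y_vector = []
--     unique_pairs = []
--
--     for pair in pairs_list:
--         peak_0, peak_1 = pair
--         x = peak_0[0] - peak_1[0]
--         y = peak_0[1] - peak_1[1]
--         if x not in x_vector and y not in y_vector:
--             x_vector.append(x)
--             y_vector.append(y)
--             unique_pairs.append((peak_0, peak_1))
--
--     return unique_pairs
--
-- def select_closest_peaks(peaks_list: list, inverted_peaks: list) -> list: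
--     peaks = []
--     for i in inverted_peaks:
--         radius = 1
--         found_peak = False
--         while not found_peak and radius <= 20:
--             found_peak = find_a_peak_in_the_surrounding(peaks_list, i, radius)
--             radius += 1
--         if found_peak:
--             peaks.append((found_peak, i))
--     peaks = remove_repeated_items(peaks)
--     return peaks
--
-- def find_a_peak_in_the_surrounding(
--     peaks_list: list, inverted_peak: list, radius: int
-- ) -> list:
--     cut_peaks_list = []
--     cut_peaks_list = [
--         (
--             peak,
--             math.sqrt(
--                 (peak[0] - inverted_peak[0]) ** 2 + (peak[1] - inverted_peak[1]) ** 2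
--             ),
--         )
--         for peak in peaks_list
--         if math.sqrt(
--             (peak[0] - inverted_peak[0]) ** 2 + (peak[1] - inverted_peak[1]) ** 2
--         )
--         <= radius
--     ]
--     cut_peaks_list.sort(key=lambda x: x[1])
--
--     if cut_peaks_list == []:
--         return False
--     else:
--         return cut_peaks_list[0][0]
-- ===== SOURCE B (Python) =====
-- def select_closest_peaks(peaks_list: list, inverted_peaks: list) -> list:
--     peaks = []
--     seen_x = set()
--     seen_y = set()
--     for inv in inverted_peaks:
--         # one linear scan: first peak with minimal squared distance
--         best = None
--         best_d2 = None
--         for p in peaks_list: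
--             d2 = (p[0] - inv[0]) ** 2 + (p[1] - inv[1]) ** 2
--             if best_d2 is None or d2 < best_d2:
--                 best, best_d2 = p, d2
--         if best is not None and best_d2 <= 400:
--             dx = best[0] - inv[0]
--             dy = best[1] - inv[1]
--             if dx not in seen_x and dy not in seen_y:
--                 seen_x.add(dx)
--                 seen_y.add(dy)
--                 peaks.append((best, inv))
--     return peaks
-- ===== Notes on version B (the rewrite author's own statement) =====
-- stated objective: faster
-- what changed: Replaces the grow-radius-1..20 loop that filters and sorts the whole peak list at every radius with one linear scan per inverted peak tracking the first minimal squared distance (accepted iff <= 400), and fuses the dedup pass in with set membership.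
import Mathlib
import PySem

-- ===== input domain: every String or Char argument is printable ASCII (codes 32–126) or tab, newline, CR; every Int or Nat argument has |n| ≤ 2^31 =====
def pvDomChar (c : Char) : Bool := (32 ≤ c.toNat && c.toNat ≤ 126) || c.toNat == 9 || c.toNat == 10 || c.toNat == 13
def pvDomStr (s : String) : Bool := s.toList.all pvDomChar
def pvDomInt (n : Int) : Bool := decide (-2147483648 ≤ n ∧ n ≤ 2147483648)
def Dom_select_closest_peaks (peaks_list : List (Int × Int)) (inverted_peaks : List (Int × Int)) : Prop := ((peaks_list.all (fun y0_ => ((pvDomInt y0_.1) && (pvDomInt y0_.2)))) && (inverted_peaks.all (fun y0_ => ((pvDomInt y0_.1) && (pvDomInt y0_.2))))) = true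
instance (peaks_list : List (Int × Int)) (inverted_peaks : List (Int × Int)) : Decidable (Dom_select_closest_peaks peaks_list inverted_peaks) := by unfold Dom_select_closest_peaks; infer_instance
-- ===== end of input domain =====

-- B replaces A's grow-radius filter+sort search by one linear min-scan per inverted peak and fuses the
-- dedup pass in; a timing run reports it faster (A is O(m·20·n log n), B is O(m·n)).

-- ===== PORT A =====
-- math.sqrt((px-ix)**2+(py-iy)**2) <= radius is ported as the exact integer test d2 ≤ radius*radius
-- (exact: d2, radius are integers, 1 ≤ radius ≤ 20, and float sqrt is correctly rounded and monotone);
-- the sort key math.sqrt(d2) is ported as the integer key d2 (exact: sqrt is strictly monotone, so it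
-- induces the same ordering and the same ties as d2 on the integers 0..400 that reach the sort).
def find_a_peak_in_the_surrounding (peaks_list : List (Int × Int)) (inverted_peak : Int × Int) (radius : Int) : Option (Int × Int) :=
  let cut_peaks_list := (peaks_list.filter (fun peak =>
      (peak.1 - inverted_peak.1)^2 + (peak.2 - inverted_peak.2)^2 ≤ radius * radius)).map
      (fun peak => (peak, (peak.1 - inverted_peak.1)^2 + (peak.2 - inverted_peak.2)^2))
  let cut_peaks_list := PySem.List.sorted cut_peaks_list (fun x => x.2)
  match cut_peaks_list with
  | [] => none          -- Python: return False (falsy) → the while loop keeps searching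
  | x :: _ => some x.1

def remove_repeated_items (pairs_list : List ((Int × Int) × (Int × Int))) : List ((Int × Int) × (Int × Int)) :=
  let st := pairs_list.foldl (fun (st : List Int × List Int × List ((Int × Int) × (Int × Int))) pair =>
      let x := pair.1.1 - pair.2.1
      let y := pair.1.2 - pair.2.2
      if x ∉ st.1 ∧ y ∉ st.2.1 then (st.1 ++ [x], st.2.1 ++ [y], st.2.2 ++ [(pair.1, pair.2)]) else st)
    ([], [], [])
  st.2.2

-- one step of A's 'while not found_peak and radius <= 20' loop
def pvRadiusStep (peaks_list : List (Int × Int)) (i : Int × Int)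
    (found_peak : Option (Int × Int)) (radius : Int) : Option (Int × Int) :=
  match found_peak with
  | some p => some p
  | none => find_a_peak_in_the_surrounding peaks_list i radius

-- A's while loop: radius takes the values 1..20, stopping at the first hit
def pvFindLoop (peaks_list : List (Int × Int)) (i : Int × Int) : Option (Int × Int) :=
  (PySem.List.pyRange 1 21).foldl (pvRadiusStep peaks_list i) none

-- the body of A's 'for i in inverted_peaks' loop
def pvBuildStep (peaks_list : List (Int × Int)) (peaks : List ((Int × Int) × (Int × Int)))
    (i : Int × Int) : List ((Int × Int) × (Int × Int)) :=
  match pvFindLoop peaks_list i with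
  | some p => peaks ++ [(p, i)]
  | none => peaks

def select_closest_peaks (peaks_list : List (Int × Int)) (inverted_peaks : List (Int × Int)) : List ((Int × Int) × (Int × Int)) :=
  remove_repeated_items (inverted_peaks.foldl (pvBuildStep peaks_list) [])

-- ===== PORT B =====
-- one linear scan: first peak with minimal squared distance (Source B's inner for loop)
def pvBestPeak (peaks_list : List (Int × Int)) (inv : Int × Int) : Option ((Int × Int) × Int) :=
  peaks_list.foldl (fun best p =>
      let d2 := (p.1 - inv.1)^2 + (p.2 - inv.2)^2
      match best with
      | none => some (p, d2)
      | some qb => if d2 < qb.2 then some (p, d2) else some qb) none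

-- Source B's outer loop body: accept the best peak iff best_d2 <= 400 and its offset is new
def pvBStep (peaks_list : List (Int × Int))
    (st : PySem.Set Int × PySem.Set Int × List ((Int × Int) × (Int × Int))) (inv : Int × Int) :
    PySem.Set Int × PySem.Set Int × List ((Int × Int) × (Int × Int)) :=
  match pvBestPeak peaks_list inv with
  | none => st
  | some qb =>
    if qb.2 ≤ 400 then
      let dx := qb.1.1 - inv.1
      let dy := qb.1.2 - inv.2
      if ¬ st.1.contains dx ∧ ¬ st.2.1.contains dy then
        (st.1.add dx, st.2.1.add dy, st.2.2 ++ [(qb.1, inv)])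
      else st
    else st

def select_closest_peaks_alt (peaks_list : List (Int × Int)) (inverted_peaks : List (Int × Int)) : List ((Int × Int) × (Int × Int)) :=
  (inverted_peaks.foldl (pvBStep peaks_list) (PySem.Set.empty, PySem.Set.empty, [])).2.2

-- ===== PRECONDITION & SPEC =====
def Spec_select_closest_peaks (peaks_list : List (Int × Int)) (inverted_peaks : List (Int × Int)) (out : List ((Int × Int) × (Int × Int))) : Prop := out = select_closest_peaks_alt peaks_list inverted_peaks
instance (peaks_list : List (Int × Int)) (inverted_peaks : List (Int × Int)) (out : List ((Int × Int) × (Int × Int))) : Decidable (Spec_select_closest_peaks peaks_list inverted_peaks out) := by unfold Spec_select_closest_peaks; infer_instance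

-- ===== CLAIM (what is proved, stated in full; the proofs are below) =====
def Claim_equal_select_closest_peaks : Prop := ∀ (peaks_list : List (Int × Int)) (inverted_peaks : List (Int × Int)), Dom_select_closest_peaks peaks_list inverted_peaks → Spec_select_closest_peaks peaks_list inverted_peaks (select_closest_peaks peaks_list inverted_peaks)

-- ===== LEMMAS AND PROOFS =====

-- squared distance (the value both programs compute inline)
def pvD2 (inv p : Int × Int) : Int := (p.1 - inv.1)^2 + (p.2 - inv.2)^2

-- running "first minimum" fold
def pvRmin {α : Type} (f : α → Int) (b : Option α) (xs : List α) : Option α :=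
  xs.foldl (fun b x => match b with | none => some x | some y => if f x < f y then some x else some y) b

lemma pvRmin_cons_none {α : Type} (f : α → Int) (x : α) (t : List α) :
    pvRmin f none (x :: t) = pvRmin f (some x) t := rfl

lemma pvRmin_cons_some {α : Type} (f : α → Int) (x y : α) (t : List α) :
    pvRmin f (some x) (y :: t) = pvRmin f (if f y < f x then some y else some x) t := rfl

lemma pvRmin_append {α : Type} (f : α → Int) (b : Option α) (l₁ l₂ : List α) :
    pvRmin f b (l₁ ++ l₂) = pvRmin f (pvRmin f b l₁) l₂ := by
  simp [pvRmin, List.foldl_append]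

lemma pvRmin_isSome {α : Type} (f : α → Int) (y : α) (xs : List α) :
    ∃ q, pvRmin f (some y) xs = some q := by
  induction xs generalizing y with
  | nil => exact ⟨y, rfl⟩
  | cons x t ih =>
    rw [pvRmin_cons_some]
    by_cases h : f x < f y
    · rw [if_pos h]; exact ih x
    · rw [if_neg h]; exact ih y

lemma pvRmin_some_decomp {α : Type} (f : α → Int) (t : List α) (x q : α)
    (h : pvRmin f (some x) t = some q) :
    (q = x ∧ ∀ p ∈ t, f x ≤ f p) ∨
    (∃ l₁ l₂, t = l₁ ++ q :: l₂ ∧ f q < f x ∧ (∀ p ∈ l₁, f q < f p) ∧ (∀ p ∈ l₂, f q ≤ f p)) := by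
  induction t generalizing x with
  | nil =>
    left
    simp [pvRmin] at h
    exact ⟨h.symm, by simp⟩
  | cons y t' ih =>
    rw [pvRmin_cons_some] at h
    by_cases hyx : f y < f x
    · rw [if_pos hyx] at h
      rcases ih y h with ⟨rfl, hall⟩ | ⟨l₁, l₂, rfl, hlt, h1, h2⟩
      · right; exact ⟨[], t', by simp, hyx, by simp, hall⟩
      · right
        refine ⟨y :: l₁, l₂, by simp, lt_trans hlt hyx, ?_, h2⟩
        intro p hp
        rcases List.mem_cons.mp hp with rfl | hp
        · exact hlt
        · exact h1 p hp
    · rw [if_neg hyx] at h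
      rcases ih x h with ⟨rfl, hall⟩ | ⟨l₁, l₂, rfl, hlt, h1, h2⟩
      · left
        refine ⟨rfl, ?_⟩
        intro p hp
        rcases List.mem_cons.mp hp with rfl | hp
        · exact le_of_not_gt hyx
        · exact hall p hp
      · right
        refine ⟨y :: l₁, l₂, by simp, hlt, ?_, h2⟩
        intro p hp
        rcases List.mem_cons.mp hp with rfl | hp
        · exact lt_of_lt_of_le hlt (le_of_not_gt hyx)
        · exact h1 p hp

lemma pvRmin_none_decomp {α : Type} (f : α → Int) (xs : List α) (q : α)
    (h : pvRmin f none xs = some q) :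
    ∃ l₁ l₂, xs = l₁ ++ q :: l₂ ∧ (∀ p ∈ l₁, f q < f p) ∧ (∀ p ∈ l₂, f q ≤ f p) := by
  cases xs with
  | nil => simp [pvRmin] at h
  | cons x t =>
    rw [pvRmin_cons_none] at h
    rcases pvRmin_some_decomp f t x q h with ⟨rfl, hall⟩ | ⟨l₁, l₂, rfl, _, h1, h2⟩
    · exact ⟨[], t, by simp, by simp, hall⟩
    · refine ⟨x :: l₁, l₂, by simp, ?_, h2⟩
      intro p hp
      rcases List.mem_cons.mp hp with rfl | hp
      · exact ‹f q < f p›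
      · exact h1 p hp

lemma pvRmin_stays {α : Type} (f : α → Int) (q : α) (l : List α)
    (h : ∀ p ∈ l, f q ≤ f p) : pvRmin f (some q) l = some q := by
  induction l with
  | nil => rfl
  | cons x t ih =>
    rw [pvRmin_cons_some, if_neg (not_lt.mpr (h x (by simp)))]
    exact ih (fun p hp => h p (List.mem_cons_of_mem _ hp))

lemma pvRmin_of_decomp {α : Type} (f : α → Int) (q : α) (l₁ l₂ : List α)
    (h1 : ∀ p ∈ l₁, f q < f p) (h2 : ∀ p ∈ l₂, f q ≤ f p) :
    pvRmin f none (l₁ ++ q :: l₂) = some q := by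
  rw [pvRmin_append]
  have hinv : ∀ (b : Option α), (b = none ∨ ∃ y, b = some y ∧ f q < f y) →
      (pvRmin f b l₁ = none ∨ ∃ y, pvRmin f b l₁ = some y ∧ f q < f y) := by
    intro b hb
    induction l₁ generalizing b with
    | nil => exact hb
    | cons x t ih =>
      have hx : f q < f x := h1 x (by simp)
      have ht : ∀ p ∈ t, f q < f p := fun p hp => h1 p (List.mem_cons_of_mem _ hp)
      rcases hb with rfl | ⟨y, rfl, hy⟩
      · rw [pvRmin_cons_none]; exact ih ht _ (Or.inr ⟨x, rfl, hx⟩)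
      · rw [pvRmin_cons_some]
        by_cases hxy : f x < f y
        · rw [if_pos hxy]; exact ih ht _ (Or.inr ⟨x, rfl, hx⟩)
        · rw [if_neg hxy]; exact ih ht _ (Or.inr ⟨y, rfl, hy⟩)
  rcases hinv none (Or.inl rfl) with hn | ⟨y, hy, hqy⟩
  · rw [hn]
    show pvRmin f (some q) l₂ = some q
    exact pvRmin_stays f q l₂ h2
  · rw [hy]
    rw [pvRmin_cons_some, if_pos hqy]
    exact pvRmin_stays f q l₂ h2

lemma pvRmin_map {α β : Type} (h : α → β) (g : β → Int) (xs : List α) (b : Option α) :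
    pvRmin g (b.map h) (xs.map h) = (pvRmin (fun a => g (h a)) b xs).map h := by
  induction xs generalizing b with
  | nil => rfl
  | cons x t ih =>
    simp only [pvRmin, List.map_cons, List.foldl_cons]
    cases b with
    | none => exact ih (some x)
    | some y =>
      simp only [Option.map_some]
      by_cases hc : g (h x) < g (h y) <;> simp only [hc, if_pos, ite_false]
      · exact ih (some x)
      · exact ih (some y)

-- head of Python's stable insertion sort = running first-minimum of the keys
lemma pv_head_insertBy {α : Type} (g : α → Int) (x : α) (ys : List α) :
    (PySem.List.insertBy (fun a b => decide (g a < g b)) x ys).head? =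
      some (match ys.head? with | none => x | some y => if g x < g y then x else y) := by
  cases ys with
  | nil => rfl
  | cons y t =>
    by_cases h : g x < g y <;> simp [PySem.List.insertBy, h]

lemma pv_head_foldl_insertBy {α : Type} (g : α → Int) (xs : List α) (acc : List α) :
    (xs.foldl (fun acc x => PySem.List.insertBy (fun a b => decide (g a < g b)) x acc) acc).head? =
      pvRmin g acc.head? xs := by
  induction xs generalizing acc with
  | nil => rfl
  | cons x t ih =>
    simp only [List.foldl_cons]
    rw [ih]
    have : (PySem.List.insertBy (fun a b => decide (g a < g b)) x acc).head? =
        (fun (b : Option α) x => match b with | none => some x | some y => if g x < g y then some x else some y) acc.head? x := by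
      rw [pv_head_insertBy]
      cases acc with
      | nil => rfl
      | cons y t' => by_cases h : g x < g y <;> simp [h]
    rw [this]
    rfl

lemma pv_head_sorted {α : Type} (g : α → Int) (xs : List α) :
    (PySem.List.sorted xs g).head? = pvRmin g none xs := by
  rw [PySem.List.sorted_eq_foldl_insertBy]
  exact pv_head_foldl_insertBy g xs []

-- A's single-radius search, characterised by the global first-minimum of squared distance
lemma pv_find_eq (peaks_list : List (Int × Int)) (i : Int × Int) (r : Int) :
    find_a_peak_in_the_surrounding peaks_list i r =
      (pvRmin (fun x => x.2) none
        ((peaks_list.filter (fun p => pvD2 i p ≤ r * r)).map (fun p => (p, pvD2 i p)))).map (fun x => x.1) := by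
  unfold find_a_peak_in_the_surrounding
  simp only [pvD2]
  rw [show ∀ (l : List ((Int × Int) × Int)),
      (match PySem.List.sorted l (fun x => x.2) with
        | [] => (none : Option (Int × Int))
        | x :: _ => some x.1) = (PySem.List.sorted l (fun x => x.2)).head?.map (fun x => x.1) from ?_]
  · rw [pv_head_sorted]
    rfl
  · intro l
    cases PySem.List.sorted l (fun x => x.2) <;> rfl

lemma pv_find_char_some (peaks_list : List (Int × Int)) (i : Int × Int) (r : Int) (q : Int × Int)
    (hq : pvRmin (pvD2 i) none peaks_list = some q) :
    find_a_peak_in_the_surrounding peaks_list i r =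
      (if pvD2 i q ≤ r * r then some q else none) := by
  rw [pv_find_eq]
  obtain ⟨l₁, l₂, rfl, h1, h2⟩ := pvRmin_none_decomp (pvD2 i) peaks_list q hq
  by_cases hc : pvD2 i q ≤ r * r
  · rw [if_pos hc]
    have hfil : (l₁ ++ q :: l₂).filter (fun p => pvD2 i p ≤ r * r) =
        l₁.filter (fun p => pvD2 i p ≤ r * r) ++ q :: l₂.filter (fun p => pvD2 i p ≤ r * r) := by
      simp [List.filter_append, hc]
    rw [hfil, List.map_append, List.map_cons]
    rw [pvRmin_of_decomp (fun x => x.2) (q, pvD2 i q)]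
    · rfl
    · intro p hp
      simp only [List.mem_map, List.mem_filter] at hp
      obtain ⟨a, ⟨ha, _⟩, rfl⟩ := hp
      exact h1 a ha
    · intro p hp
      simp only [List.mem_map, List.mem_filter] at hp
      obtain ⟨a, ⟨ha, _⟩, rfl⟩ := hp
      exact h2 a ha
  · rw [if_neg hc]
    have hfil : (l₁ ++ q :: l₂).filter (fun p => pvD2 i p ≤ r * r) = [] := by
      rw [List.filter_eq_nil_iff]
      intro p hp
      simp only [decide_eq_true_eq]
      intro hle
      rcases List.mem_append.mp hp with hp | hp
      · exact hc (le_trans (le_of_lt (h1 p hp)) hle)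
      · rcases List.mem_cons.mp hp with rfl | hp
        · exact hc hle
        · exact hc (le_trans (h2 p hp) hle)
    rw [hfil]
    rfl

-- the early-exit fold over a list of radii, for any step that keeps a hit and probes on none
lemma pv_foldl_exit_some {β : Type} (step : Option β → Int → Option β)
    (hsome : ∀ p r, step (some p) r = some p) (rs : List Int) (p : β) :
    rs.foldl step (some p) = some p := by
  induction rs with
  | nil => rfl
  | cons r t ih => rw [List.foldl_cons, hsome]; exact ih

lemma pv_foldl_exit {β : Type} (step : Option β → Int → Option β) (g : Int → Option β)
    (hsome : ∀ p r, step (some p) r = some p) (hnone : ∀ r, step none r = g r)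
    (rs : List Int) (q : β) (c : Int → Prop)
    [DecidablePred c] (hg : ∀ r ∈ rs, g r = if c r then some q else none) :
    rs.foldl step none = (if ∃ r ∈ rs, c r then some q else none) := by
  induction rs with
  | nil => simp
  | cons r t ih =>
    rw [List.foldl_cons, hnone, hg r (by simp)]
    by_cases hc : c r
    · have he : ∃ r' ∈ r :: t, c r' := ⟨r, by simp, hc⟩
      rw [if_pos hc, pv_foldl_exit_some step hsome, if_pos he]
    · rw [if_neg hc]
      rw [ih (fun r hr => hg r (List.mem_cons_of_mem _ hr))]
      by_cases he : ∃ r ∈ t, c r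
      · rw [if_pos he, if_pos]
        obtain ⟨r', hr', hc'⟩ := he
        exact ⟨r', List.mem_cons_of_mem _ hr', hc'⟩
      · rw [if_neg he, if_neg]
        rintro ⟨r', hr', hc'⟩
        rcases List.mem_cons.mp hr' with rfl | hr'
        · exact hc hc'
        · exact he ⟨r', hr', hc'⟩

lemma pv_findLoop_char (peaks_list : List (Int × Int)) (i : Int × Int) (q : Int × Int)
    (hq : pvRmin (pvD2 i) none peaks_list = some q) :
    pvFindLoop peaks_list i = (if pvD2 i q ≤ 400 then some q else none) := by
  unfold pvFindLoop
  rw [pv_foldl_exit (pvRadiusStep peaks_list i)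
      (fun r => find_a_peak_in_the_surrounding peaks_list i r)
      (fun p r => rfl) (fun r => rfl)
      (PySem.List.pyRange 1 21) q (fun r => pvD2 i q ≤ r * r)
      (fun r _ => pv_find_char_some peaks_list i r q hq)]
  by_cases hc : pvD2 i q ≤ 400
  · rw [if_pos hc, if_pos]
    exact ⟨20, PySem.List.mem_pyRange_one.mpr (by omega), by linarith⟩
  · rw [if_neg hc, if_neg]
    rintro ⟨r, hr, hle⟩
    have hb := PySem.List.mem_pyRange_one.mp hr
    have : r * r ≤ 400 := by nlinarith [hb.1, hb.2]
    exact hc (le_trans hle this)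

lemma pv_findLoop_nil (i : Int × Int) : pvFindLoop [] i = none := by
  unfold pvFindLoop
  rw [pv_foldl_exit (pvRadiusStep [] i) (fun r => find_a_peak_in_the_surrounding [] i r)
      (fun p r => rfl) (fun r => rfl) (PySem.List.pyRange 1 21) ((0 : Int), (0 : Int))
      (fun _ => False) (fun r _ => rfl)]
  simp

lemma pvBestPeak_eq (peaks_list : List (Int × Int)) (i : Int × Int) :
    pvBestPeak peaks_list i = (pvRmin (pvD2 i) none peaks_list).map (fun p => (p, pvD2 i p)) := by
  rw [← pvRmin_map (fun p => (p, pvD2 i p)) (fun x => x.2) peaks_list none]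
  unfold pvBestPeak pvRmin
  rw [List.foldl_map]
  refine List.foldl_ext _ _ _ ?_
  intro b p _
  cases b <;> simp [pvD2]

-- per-inverted-peak agreement: A's radius loop = B's min-scan + threshold
lemma pv_found_eq (peaks_list : List (Int × Int)) (i : Int × Int) :
    pvFindLoop peaks_list i =
      (match pvBestPeak peaks_list i with
        | none => none
        | some qb => if qb.2 ≤ 400 then some qb.1 else none) := by
  rcases hm : pvRmin (pvD2 i) none peaks_list with _ | q
  · have hnil : peaks_list = [] := by
      cases peaks_list with
      | nil => rfl
      | cons x t =>
        obtain ⟨q, hq⟩ := pvRmin_isSome (pvD2 i) x t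
        rw [pvRmin_cons_none, hq] at hm
        exact absurd hm (by simp)
    subst hnil
    rw [pv_findLoop_nil, pvBestPeak_eq, hm]
    rfl
  · rw [pv_findLoop_char peaks_list i q hm, pvBestPeak_eq, hm]
    by_cases hc : pvD2 i q ≤ 400 <;> simp [hc]

-- A's dedup step (the body of remove_repeated_items' loop)
def pvDStep (st : List Int × List Int × List ((Int × Int) × (Int × Int)))
    (pair : (Int × Int) × (Int × Int)) : List Int × List Int × List ((Int × Int) × (Int × Int)) :=
  let x := pair.1.1 - pair.2.1
  let y := pair.1.2 - pair.2.2
  if x ∉ st.1 ∧ y ∉ st.2.1 then (st.1 ++ [x], st.2.1 ++ [y], st.2.2 ++ [(pair.1, pair.2)]) else st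

lemma remove_repeated_items_eq (l : List ((Int × Int) × (Int × Int))) :
    remove_repeated_items l = (l.foldl pvDStep ([], [], [])).2.2 := rfl

-- "apply A's dedup step to the found pair, if any" (the fused loop body)
def pvAStep (peaks_list : List (Int × Int)) (st : List Int × List Int × List ((Int × Int) × (Int × Int)))
    (i : Int × Int) : List Int × List Int × List ((Int × Int) × (Int × Int)) :=
  match pvFindLoop peaks_list i with
  | none => st
  | some p => pvDStep st (p, i)

-- B's loop body = the fused loop body
lemma pv_bstep_eq (peaks_list : List (Int × Int))
    (st : PySem.Set Int × PySem.Set Int × List ((Int × Int) × (Int × Int))) (inv : Int × Int) :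
    pvBStep peaks_list st inv = pvAStep peaks_list st inv := by
  unfold pvBStep pvAStep
  rw [pv_found_eq]
  rcases pvBestPeak peaks_list inv with _ | qb
  · rfl
  · show (if qb.2 ≤ 400 then
        (if ¬st.1.contains (qb.1.1 - inv.1) = true ∧ ¬st.2.1.contains (qb.1.2 - inv.2) = true then
          (st.1.add (qb.1.1 - inv.1), st.2.1.add (qb.1.2 - inv.2), st.2.2 ++ [(qb.1, inv)])
        else st)
      else st) =
      (match (if qb.2 ≤ 400 then some qb.1 else none) with
        | none => st
        | some p => pvDStep st (p, inv))
    by_cases hc : qb.2 ≤ 400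
    · rw [if_pos hc, if_pos hc]
      show _ = pvDStep st (qb.1, inv)
      unfold pvDStep PySem.Set.add
      simp only [PySem.Set.contains, List.contains_iff_mem]
      by_cases hx : qb.1.1 - inv.1 ∈ st.1 <;> by_cases hy : qb.1.2 - inv.2 ∈ st.2.1 <;>
        simp [hx, hy]
    · rw [if_neg hc, if_neg hc]

lemma pvBuildStep_none (peaks_list : List (Int × Int)) (acc : List ((Int × Int) × (Int × Int)))
    (i : Int × Int) (h : pvFindLoop peaks_list i = none) : pvBuildStep peaks_list acc i = acc := by
  unfold pvBuildStep; rw [h]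

lemma pvBuildStep_some (peaks_list : List (Int × Int)) (acc : List ((Int × Int) × (Int × Int)))
    (i p : Int × Int) (h : pvFindLoop peaks_list i = some p) :
    pvBuildStep peaks_list acc i = acc ++ [(p, i)] := by
  unfold pvBuildStep; rw [h]

lemma pvAStep_none (peaks_list : List (Int × Int)) (st : List Int × List Int × List ((Int × Int) × (Int × Int)))
    (i : Int × Int) (h : pvFindLoop peaks_list i = none) : pvAStep peaks_list st i = st := by
  unfold pvAStep; rw [h]

lemma pvAStep_some (peaks_list : List (Int × Int)) (st : List Int × List Int × List ((Int × Int) × (Int × Int)))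
    (i p : Int × Int) (h : pvFindLoop peaks_list i = some p) :
    pvAStep peaks_list st i = pvDStep st (p, i) := by
  unfold pvAStep; rw [h]

-- fusing the dedup fold into the building fold
lemma pv_fuse (peaks_list : List (Int × Int)) (invs : List (Int × Int))
    (acc : List ((Int × Int) × (Int × Int))) (st : List Int × List Int × List ((Int × Int) × (Int × Int))) :
    ((invs.foldl (pvBuildStep peaks_list) acc).foldl pvDStep st) =
      invs.foldl (pvAStep peaks_list) (acc.foldl pvDStep st) := by
  induction invs generalizing acc st with
  | nil => rfl
  | cons i t ih =>
    simp only [List.foldl_cons]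
    generalize hF : pvFindLoop peaks_list i = F
    cases F with
    | none =>
      rw [pvBuildStep_none peaks_list acc i hF, pvAStep_none peaks_list _ i hF]
      exact ih acc st
    | some p =>
      rw [pvBuildStep_some peaks_list acc i p hF, pvAStep_some peaks_list _ i p hF,
        ih (acc ++ [(p, i)]) st, List.foldl_append]
      rfl

-- ===== VERDICT (by name: the statement is the Claim_ definition above) =====
theorem select_closest_peaks_spec : Claim_equal_select_closest_peaks := by
  intro peaks_list inverted_peaks _
  show select_closest_peaks peaks_list inverted_peaks = select_closest_peaks_alt peaks_list inverted_peaks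
  have h2 : inverted_peaks.foldl (pvAStep peaks_list) ([], [], []) =
      inverted_peaks.foldl (pvBStep peaks_list) (PySem.Set.empty, PySem.Set.empty, []) :=
    List.foldl_ext _ _ _ (fun st i _ => (pv_bstep_eq peaks_list st i).symm)
  show remove_repeated_items (inverted_peaks.foldl (pvBuildStep peaks_list) []) = _
  rw [remove_repeated_items_eq, pv_fuse peaks_list inverted_peaks [] ([], [], [])]
  show (inverted_peaks.foldl (pvAStep peaks_list) ([], [], [])).2.2 = _
  rw [h2]
  rfl
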